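-- pv_equiv track=rewrite | github.com/chendss/cloneWebPage | copy_factory.py | replace_href
-- ===== SOURCE A (Python) =====
-- def replace_href(text):
--     """
--     将脚本中有关于url操作的代码替换掉
--     """
--     ident_list = [
--         "href", "ancestorOrigins", "origin", "protocol", "host", "hostname",
--         "port", "pathname", "search", "hash", "assign", "reload", "toString", "replace"
--     ]
--     text = text.replace('window.location.href', 'window.location.a')
--     base = 'window.location'
--     for ident in ident_list:
--         a = '{}.{}'.format(base, ident)
--         b = '{}.a'.format(base)
--         text = text.replace(a, b)
--     return text
-- ===== SOURCE B (Python) =====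
-- def replace_href(text):
--     """
--     将脚本中有关于url操作的代码替换掉
--     """
--     ident_list = [
--         "href", "ancestorOrigins", "origin", "protocol", "host", "hostname",
--         "port", "pathname", "search", "hash", "assign", "reload", "toString", "replace"
--     ]
--     base = 'window.location.'
--     parts = text.split(base)
--     pieces = [parts[0]]
--     for part in parts[1:]:
--         for ident in ident_list:
--             if part.startswith(ident):
--                 part = 'a' + part[len(ident):]
--         pieces.append(part)
--     return base.join(pieces)
-- ===== Notes on version B (the rewrite author's own statement) =====
-- stated objective: alternative
-- what changed: A runs fifteen sequential full-text str.replace passes (one per identifier); B splits the text once on 'window.location.' and applies the identifier prefix rewrites in list order to each segment, then joins -- one split/scan of the text instead of fifteen full-text passes.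
import Mathlib
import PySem

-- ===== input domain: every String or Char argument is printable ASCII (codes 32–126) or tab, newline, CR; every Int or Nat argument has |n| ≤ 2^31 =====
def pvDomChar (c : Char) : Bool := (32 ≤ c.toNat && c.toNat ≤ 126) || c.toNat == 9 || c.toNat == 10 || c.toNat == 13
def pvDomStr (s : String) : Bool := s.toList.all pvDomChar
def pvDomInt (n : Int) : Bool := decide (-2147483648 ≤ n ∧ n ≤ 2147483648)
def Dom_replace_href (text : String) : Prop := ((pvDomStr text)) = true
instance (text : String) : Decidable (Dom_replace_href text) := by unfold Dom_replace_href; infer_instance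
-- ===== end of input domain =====

-- B scans the text once: it splits on 'window.location.' and rewrites each segment by the identifier
-- prefix actions in list order, instead of A's fifteen sequential full-text replace passes (alternative
-- single-scan decomposition, same return value).

-- ===== PORT A =====
def pvIdents : List String :=
  ["href", "ancestorOrigins", "origin", "protocol", "host", "hostname",
   "port", "pathname", "search", "hash", "assign", "reload", "toString", "replace"]

def replace_href (text : String) : String :=
  let text1 := PySem.Str.replace text "window.location.href" "window.location.a"
  pvIdents.foldl (fun t ident =>
    PySem.Str.replace t ("window.location" ++ "." ++ ident) ("window.location" ++ ".a")) text1

-- ===== PORT B =====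
def pvIdentsAlt : List String :=
  ["href", "ancestorOrigins", "origin", "protocol", "host", "hostname",
   "port", "pathname", "search", "hash", "assign", "reload", "toString", "replace"]

def replace_href_alt (text : String) : String :=
  match PySem.Str.split? text "window.location." with
  | some (p0 :: rest) =>
      PySem.Str.join "window.location." (p0 :: rest.map (fun part =>
        pvIdentsAlt.foldl (fun part ident =>
          if PySem.Str.startswith part ident then
            "a" ++ PySem.Str.slice part (some (PySem.Str.len ident)) none
          else part) part))
  | _ => text  -- unreachable: splitting on the non-empty literal separator always yields a non-empty list

-- ===== PRECONDITION & SPEC =====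
def Spec_replace_href (text : String) (out : String) : Prop := out = replace_href_alt text
instance (text : String) (out : String) : Decidable (Spec_replace_href text out) := by unfold Spec_replace_href; infer_instance

-- ===== CLAIM (what is proved, stated in full; the proofs are below) =====
def Claim_equal_replace_href : Prop := ∀ (text : String), Dom_replace_href text → Spec_replace_href text (replace_href text)

-- ===== LEMMAS AND PROOFS =====

-- ---- character-level constants ----
abbrev pvP : List Char := ['w','i','n','d','o','w','.','l','o','c','a','t','i','o','n','.']
abbrev iHref : List Char := ['h','r','e','f']
def pvIdentsL : List (List Char) := pvIdents.map String.toList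
def pvAllL : List (List Char) := iHref :: pvIdentsL

-- ---- fuel-free models of PySem.Chars.replace / PySem.Chars.splitOn ----
def pvRepl (pat new : List Char) : List Char → List Char
  | [] => []
  | c :: t =>
    if pat <+: (c :: t) then new ++ pvRepl pat new (t.drop (pat.length - 1))
    else c :: pvRepl pat new t
termination_by l => l.length
decreasing_by all_goals simp [List.length_drop]

def pvSplit : List Char → List (List Char)
  | [] => [[]]
  | c :: t =>
    if pvP <+: (c :: t) then [] :: pvSplit (t.drop 15)
    else
      match pvSplit t with
      | [] => [[c]]
      | y :: ys => (c :: y) :: ys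
termination_by l => l.length
decreasing_by all_goals simp [List.length_drop]

def pvGlue (ps : List (List Char)) : List Char := (ps.map (fun p => pvP ++ p)).flatten
def pvActI (i p : List Char) : List Char := if i <+: p then 'a' :: p.drop i.length else p
def pvFoldActs (is : List (List Char)) (p : List Char) : List Char :=
  is.foldl (fun p i => pvActI i p) p

-- ---- equation helpers ----
lemma pvRepl_nil (pat new : List Char) : pvRepl pat new [] = [] := by rw [pvRepl]

lemma pvRepl_cons (pat new : List Char) (c : Char) (t : List Char) :
    pvRepl pat new (c :: t) =
      if pat <+: (c :: t) then new ++ pvRepl pat new (t.drop (pat.length - 1))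
      else c :: pvRepl pat new t := by rw [pvRepl]

lemma pvRepl_neg {pat : List Char} (new : List Char) {c : Char} {t : List Char}
    (h : ¬ pat <+: (c :: t)) :
    pvRepl pat new (c :: t) = c :: pvRepl pat new t := by rw [pvRepl_cons, if_neg h]

lemma drop_pred_cons {pat : List Char} (h : pat ≠ []) (c : Char) (t : List Char) :
    t.drop (pat.length - 1) = (c :: t).drop pat.length := by
  obtain ⟨n, hn⟩ : ∃ n, pat.length = n + 1 := by
    cases pat with
    | nil => exact absurd rfl h
    | cons a l => exact ⟨l.length, rfl⟩
  simp [hn]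

lemma pvRepl_pos' {pat : List Char} (new : List Char) {l : List Char}
    (h : pat <+: l) (hp : pat ≠ []) :
    pvRepl pat new l = new ++ pvRepl pat new (l.drop pat.length) := by
  cases l with
  | nil =>
    exact absurd (List.prefix_nil.mp h) hp
  | cons c t =>
    rw [pvRepl_cons, if_pos h, drop_pred_cons hp]

lemma pvActI_neg {i p : List Char} (h : ¬ i <+: p) : pvActI i p = p := by
  simp [pvActI, if_neg h]

lemma pvActI_cat (i r : List Char) : pvActI i (i ++ r) = 'a' :: r := by
  simp [pvActI, List.prefix_append]

lemma head_ne_prefix {c d : Char} {l t : List Char} (h : c ≠ d) : ¬ (c :: l) <+: (d :: t) :=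
  fun hx => h (List.cons_prefix_cons.mp hx).1

-- ---- linking PySem.Chars.replace to pvRepl ----
lemma replace_go_eq (pat new : List Char) (hp : pat ≠ []) :
    ∀ (fuel : Nat) (l acc : List Char), l.length ≤ fuel →
      PySem.Chars.replace.go pat new fuel l acc = acc.reverse ++ pvRepl pat new l := by
  intro fuel
  induction fuel with
  | zero =>
    intro l acc h
    have hl : l = [] := by cases l <;> simp_all
    subst hl
    rw [PySem.Chars.replace.go.eq_def]
    simp [pvRepl_nil]
  | succ f ih =>
    intro l acc h
    cases l with
    | nil =>
      rw [PySem.Chars.replace.go.eq_def]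
      simp [pvRepl_nil]
    | cons c t =>
      rw [PySem.Chars.replace.go.eq_def]
      by_cases hpre : pat <+: (c :: t)
      · simp only [List.isPrefixOf_iff_prefix.mpr hpre, if_true]
        have hp1 : 0 < pat.length := List.length_pos_iff.mpr hp
        have hlen : (List.drop pat.length (c :: t)).length ≤ f := by
          simp only [List.length_drop, List.length_cons]
          simp only [List.length_cons] at h
          omega
        rw [ih _ _ hlen, pvRepl_cons pat new c t, if_pos hpre, drop_pred_cons hp c t]
        simp [List.append_assoc]
      · have hb : pat.isPrefixOf (c :: t) = false := by
          rw [Bool.eq_false_iff]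
          intro hx
          exact hpre (List.isPrefixOf_iff_prefix.mp hx)
        simp only [hb, Bool.false_eq_true, if_false]
        have hlen : t.length ≤ f := by
          simp only [List.length_cons] at h
          omega
        rw [ih _ _ hlen, pvRepl_neg new hpre]
        simp

lemma replace_eq_pvRepl (s pat new : List Char) (hp : pat ≠ []) :
    PySem.Chars.replace s pat new = pvRepl pat new s := by
  unfold PySem.Chars.replace
  rw [if_neg (by simp [List.isEmpty_iff, hp])]
  rw [replace_go_eq pat new hp s.length s [] le_rfl]
  simp

-- ---- linking PySem.Chars.splitOn to pvSplit ----
lemma pvSplit_ne_nil : ∀ l : List Char, pvSplit l ≠ [] := by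
  intro l
  fun_induction pvSplit l <;> simp_all

lemma split_go_eq :
    ∀ (fuel : Nat) (l cur : List Char) (acc : List (List Char)), l.length < fuel →
      PySem.Chars.splitOn.go pvP fuel l cur acc =
        acc.reverse ++ (match pvSplit l with
          | [] => [cur.reverse]
          | y :: ys => (cur.reverse ++ y) :: ys) := by
  intro fuel
  induction fuel with
  | zero => intro l cur acc h; omega
  | succ f ih =>
    intro l cur acc h
    cases l with
    | nil =>
      rw [PySem.Chars.splitOn.go.eq_def]
      simp [pvSplit]
    | cons c t =>
      rw [PySem.Chars.splitOn.go.eq_def]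
      by_cases hpre : pvP <+: (c :: t)
      · simp only [List.isPrefixOf_iff_prefix.mpr hpre, if_true]
        have hdrop : List.drop pvP.length (c :: t) = t.drop 15 := by
          simp
        rw [hdrop]
        have hlen : (t.drop 15).length < f := by
          simp only [List.length_drop]
          simp only [List.length_cons] at h
          omega
        rw [ih _ _ _ hlen]
        rw [pvSplit]; rw [if_pos hpre]
        rcases hY : pvSplit (t.drop 15) with _ | ⟨y, ys⟩
        · exact absurd hY (pvSplit_ne_nil _)
        · simp
      · have hb : pvP.isPrefixOf (c :: t) = false := by
          rw [Bool.eq_false_iff]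
          intro hx
          exact hpre (List.isPrefixOf_iff_prefix.mp hx)
        simp only [hb, Bool.false_eq_true, if_false]
        have hlen : t.length < f := by
          simp only [List.length_cons] at h
          omega
        rw [ih _ _ _ hlen]
        rw [pvSplit]; rw [if_neg hpre]
        rcases hY : pvSplit t with _ | ⟨y, ys⟩
        · exact absurd hY (pvSplit_ne_nil _)
        · simp

lemma splitOn_eq_pvSplit (l : List Char) :
    PySem.Chars.splitOn l pvP = pvSplit l := by
  unfold PySem.Chars.splitOn
  rw [split_go_eq (l.length + 1) l [] [] (by omega)]
  rcases hY : pvSplit l with _ | ⟨y, ys⟩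
  · exact absurd hY (pvSplit_ne_nil _)
  · simp

-- ---- structure of pvSplit ----
lemma split_first_prefix : ∀ (l y : List Char) (ys : List (List Char)),
    pvSplit l = y :: ys → y <+: l := by
  intro l
  fun_induction pvSplit l with
  | case1 =>
    intro y ys h
    simp at h
    obtain ⟨rfl, rfl⟩ := h
    exact List.nil_prefix
  | case2 c t hpre ih =>
    intro y ys h
    simp at h
    obtain ⟨rfl, rfl⟩ := h
    exact List.nil_prefix
  | case3 c t hpre hY ih =>
    intro y ys h
    exact absurd hY (pvSplit_ne_nil _)
  | case4 c t hpre y' ys' hY ih =>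
    intro y ys h
    simp at h
    obtain ⟨rfl, rfl⟩ := h
    exact List.cons_prefix_cons.mpr ⟨rfl, ih y' ys' hY⟩

lemma split_pfree : ∀ (l p : List Char), p ∈ pvSplit l → ¬ pvP <:+: p := by
  intro l
  fun_induction pvSplit l with
  | case1 =>
    intro p hp
    simp at hp
    subst hp
    intro hc
    have := hc.length_le
    simp at this
  | case2 c t hpre ih =>
    intro p hp
    rcases List.mem_cons.mp hp with rfl | hp'
    · intro hc
      have := hc.length_le
      simp at this
    · exact ih p hp'
  | case3 c t hpre hY ih =>
    intro p hp
    exact absurd hY (pvSplit_ne_nil _)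
  | case4 c t hpre y' ys' hY ih =>
    intro p hp
    rcases List.mem_cons.mp hp with rfl | hp'
    · intro hc
      rcases List.infix_cons_iff.mp hc with hc1 | hc2
      · have hy't : y' <+: t := split_first_prefix t y' ys' hY
        have : pvP <+: (c :: t) :=
          hc1.trans (List.cons_prefix_cons.mpr ⟨rfl, hy't⟩)
        exact hpre this
      · exact ih y' (by rw [hY]; exact List.mem_cons_self) hc2
    · exact ih p (by rw [hY]; exact List.mem_cons_of_mem _ hp')

lemma split_join : ∀ (l y : List Char) (ys : List (List Char)),
    pvSplit l = y :: ys → l = y ++ pvGlue ys := by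
  intro l
  fun_induction pvSplit l with
  | case1 =>
    intro y ys h
    simp at h
    obtain ⟨rfl, rfl⟩ := h
    simp [pvGlue]
  | case2 c t hpre ih =>
    intro y ys h
    simp at h
    obtain ⟨rfl, rfl⟩ := h
    obtain ⟨r, hr⟩ := hpre
    have h2 : 'w' :: (['i','n','d','o','w','.','l','o','c','a','t','i','o','n','.'] ++ r) = c :: t := hr
    injection h2 with hch ht
    have hdr : t.drop 15 = r := by
      rw [← ht]
      exact List.drop_left' (by decide)
    rcases hY : pvSplit (t.drop 15) with _ | ⟨y', ys'⟩
    · exact absurd hY (pvSplit_ne_nil _)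
    · have ihr : r = y' ++ pvGlue ys' := by rw [← hdr, ih y' ys' hY]
      rw [← hr, ihr]
      simp [pvGlue]
  | case3 c t hpre hY ih =>
    intro y ys h
    exact absurd hY (pvSplit_ne_nil _)
  | case4 c t hpre y' ys' hY ih =>
    intro y ys h
    simp at h
    obtain ⟨rfl, rfl⟩ := h
    have := ih y' ys' hY
    simp [this]

-- ---- the separator has no nontrivial border ----
lemma pvP_noBorder : ∀ d : Nat, d < 16 → 0 < d → ¬ (pvP.drop d).isPrefixOf pvP = true := by decide

lemma pvP_noBorder' {d : Nat} (h1 : 0 < d) (h2 : d < 16) : ¬ (pvP.drop d <+: pvP) := by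
  intro hx
  exact pvP_noBorder d h2 h1 (List.isPrefixOf_iff_prefix.mpr hx)

lemma pvP_len : pvP.length = 16 := by decide

lemma BND_a (q Z : List Char) (hq : q ≠ []) (hf : ¬ pvP <:+: q) :
    ¬ pvP <+: (q ++ (pvP ++ Z)) := by
  intro h
  rcases Nat.lt_or_ge q.length pvP.length with hlt | hle
  · have hq' : q <+: pvP :=
      List.prefix_of_prefix_length_le (List.prefix_append q _) h (le_of_lt hlt)
    obtain ⟨B, hB⟩ := hq'
    have hBdrop : B = pvP.drop q.length := by
      rw [← hB, List.drop_left]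
    have hBZ : B <+: pvP ++ Z := by
      nth_rewrite 1 [← hB] at h
      exact (List.prefix_append_right_inj q).mp h
    have hBlen : B.length ≤ pvP.length := by
      have h3 := congrArg List.length hB
      simp only [List.length_append] at h3
      rw [pvP_len]
      rw [pvP_len] at h3
      omega
    have hBP : B <+: pvP :=
      List.prefix_of_prefix_length_le hBZ (List.prefix_append pvP Z) hBlen
    have h0 : 0 < q.length := List.length_pos_iff.mpr hq
    exact pvP_noBorder' h0 (by rw [pvP_len] at hlt; exact hlt) (hBdrop ▸ hBP)
  · exact hf (List.IsPrefix.isInfix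
      (List.prefix_of_prefix_length_le h (List.prefix_append q _) hle))

-- ---- pvRepl walks over pattern-free stretches ----
lemma WALKZ {pat : List Char} (new : List Char) (hP : pvP <+: pat) :
    ∀ (q Z : List Char), ¬ pvP <:+: q → (Z = [] ∨ ∃ Z', Z = pvP ++ Z') →
      pvRepl pat new (q ++ Z) = q ++ pvRepl pat new Z := by
  intro q
  induction q with
  | nil => simp
  | cons c q' ih =>
    intro Z hf hZ
    have hfq' : ¬ pvP <:+: q' := fun hx => hf (List.infix_cons_iff.mpr (Or.inr hx))
    have hnp : ¬ pat <+: (c :: (q' ++ Z)) := by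
      intro hc
      have hc' : pvP <+: ((c :: q') ++ Z) := hP.trans (by simpa using hc)
      rcases hZ with rfl | ⟨Z', rfl⟩
      · rw [List.append_nil] at hc'
        exact hf hc'.isInfix
      · exact BND_a (c :: q') Z' (by simp) hf hc'
    rw [List.cons_append, pvRepl_neg new hnp, ih Z hfq' hZ]
    simp

lemma WALKP_aux {pat : List Char} (new : List Char) (hP : pvP <+: pat) :
    ∀ (s : List Char), (∃ u : List Char, u ≠ [] ∧ u ++ s = pvP) →
      ∀ Y, pvRepl pat new (s ++ Y) = s ++ pvRepl pat new Y := by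
  intro s
  induction s with
  | nil => simp
  | cons c s' ih =>
    intro hu Y
    obtain ⟨u, hu0, hu⟩ := hu
    have hlen : u.length + (c :: s').length = 16 := by
      have := congrArg List.length hu
      simpa [pvP_len] using this
    have hnp : ¬ pat <+: (c :: (s' ++ Y)) := by
      intro hc
      have hc' : pvP <+: ((c :: s') ++ Y) := hP.trans (by simpa using hc)
      have hcs : (c :: s') <+: pvP :=
        List.prefix_of_prefix_length_le (List.prefix_append _ _) hc'
          (by simp at hlen ⊢; omega)
      have hdrop : (c :: s') = pvP.drop u.length := by
        rw [← hu, List.drop_left]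
      exact pvP_noBorder' (List.length_pos_iff.mpr hu0)
        (by simp at hlen; omega) (hdrop ▸ hcs)
    rw [List.cons_append, pvRepl_neg new hnp]
    rw [ih ⟨u ++ [c], by simp, by simpa using hu⟩ Y]
    simp

lemma WALKP {i : List Char} (new : List Char) :
    ∀ Y, ¬ i <+: Y →
      pvRepl (pvP ++ i) new (pvP ++ Y) = pvP ++ pvRepl (pvP ++ i) new Y := by
  intro Y hY
  have hnp : ¬ (pvP ++ i) <+: (pvP ++ Y) := by
    intro hc
    exact hY ((List.prefix_append_right_inj pvP).mp hc)
  have hP : pvP <+: (pvP ++ i) := List.prefix_append _ _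
  show pvRepl (pvP ++ i) new ('w' :: (List.drop 1 pvP ++ Y)) = _
  rw [pvRepl_neg new (by simpa using hnp)]
  rw [WALKP_aux new hP (List.drop 1 pvP) ⟨['w'], by simp, by decide⟩ Y]
  rfl

lemma SPILL {i : List Char} (hw : 'w' ∉ i) (x Z : List Char) :
    i <+: x ++ (pvP ++ Z) ↔ i <+: x := by
  constructor
  · intro h
    by_cases hlen : i.length ≤ x.length
    · exact List.prefix_of_prefix_length_le h (List.prefix_append x _) hlen
    · exfalso
      have hx : x <+: i :=
        List.prefix_of_prefix_length_le (List.prefix_append x _) h (by omega)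
      obtain ⟨i', rfl⟩ := hx
      have hi' : i' <+: pvP ++ Z := (List.prefix_append_right_inj x).mp h
      cases i' with
      | nil => simp at hlen
      | cons c i'' =>
        have hcw : c = 'w' := (List.cons_prefix_cons.mp hi').1
        exact hw (List.mem_append_right x (by simp [hcw]))
  · intro h
    exact h.trans (List.prefix_append x _)

-- ---- one replace pass acts segmentwise ----
lemma actI_pres {p : List Char} (i : List Char) (h : ¬ pvP <:+: p) :
    ¬ pvP <:+: pvActI i p := by
  unfold pvActI
  split_ifs with hm
  · intro hc
    rcases List.infix_cons_iff.mp hc with hpre | hinf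
    · exact absurd (List.cons_prefix_cons.mp hpre).1 (by decide)
    · exact h (hinf.trans (List.drop_suffix _ _).isInfix)
  · exact h

lemma glue_shape (ps : List (List Char)) :
    pvGlue ps = [] ∨ ∃ Z', pvGlue ps = pvP ++ Z' := by
  cases ps with
  | nil => left; simp [pvGlue]
  | cons q qs => right; exact ⟨q ++ pvGlue qs, by simp [pvGlue]⟩

lemma pass_glue {i : List Char} (_hi : i ≠ []) (hw : 'w' ∉ i) :
    ∀ ps : List (List Char), (∀ p ∈ ps, ¬ pvP <:+: p) →
      pvRepl (pvP ++ i) (pvP ++ ['a']) (pvGlue ps) = pvGlue (ps.map (pvActI i)) := by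
  intro ps
  induction ps with
  | nil => simp [pvGlue, pvRepl_nil]
  | cons p ps' ih =>
    intro hfree
    have hfp : ¬ pvP <:+: p := hfree p List.mem_cons_self
    have hfree' : ∀ q ∈ ps', ¬ pvP <:+: q := fun q hq => hfree q (List.mem_cons_of_mem _ hq)
    have hglue : pvGlue (p :: ps') = pvP ++ (p ++ pvGlue ps') := by
      simp [pvGlue]
    rw [hglue]
    by_cases hm : i <+: p
    · obtain ⟨r, rfl⟩ := hm
      have hfr : ¬ pvP <:+: r := fun hx => hfp (hx.trans (List.suffix_append i r).isInfix)
      have hpre : (pvP ++ i) <+: pvP ++ ((i ++ r) ++ pvGlue ps') :=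
        (List.prefix_append_right_inj pvP).mpr
          ((List.prefix_append i r).trans (List.prefix_append _ _))
      rw [pvRepl_pos' _ hpre (by simp)]
      have hdrop : (pvP ++ ((i ++ r) ++ pvGlue ps')).drop (pvP ++ i).length
          = r ++ pvGlue ps' := by
        rw [show pvP ++ ((i ++ r) ++ pvGlue ps') = (pvP ++ i) ++ (r ++ pvGlue ps') by
          simp [List.append_assoc]]
        exact List.drop_left
      rw [hdrop]
      rw [WALKZ _ (List.prefix_append _ _) r (pvGlue ps') hfr (glue_shape ps')]
      rw [ih hfree']
      rw [List.map_cons, pvActI_cat]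
      simp [pvGlue]
    · have hm' : ¬ i <+: p ++ pvGlue ps' := by
        rcases glue_shape ps' with hz | ⟨Z', hz⟩
        · rw [hz, List.append_nil]; exact hm
        · rw [hz]; exact fun hx => hm ((SPILL hw p Z').mp hx)
      rw [WALKP _ _ hm']
      rw [WALKZ _ (List.prefix_append _ _) p (pvGlue ps') hfp (glue_shape ps')]
      rw [ih hfree']
      rw [List.map_cons, pvActI_neg hm]
      simp [pvGlue]

lemma fold_pass :
    ∀ (is : List (List Char)), (∀ i ∈ is, i ≠ [] ∧ 'w' ∉ i) →
      ∀ (p0 : List Char) (ps : List (List Char)), ¬ pvP <:+: p0 → (∀ p ∈ ps, ¬ pvP <:+: p) →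
        is.foldl (fun l i => pvRepl (pvP ++ i) (pvP ++ ['a']) l) (p0 ++ pvGlue ps)
          = p0 ++ pvGlue (ps.map (pvFoldActs is)) := by
  intro is
  induction is with
  | nil =>
    intro _ p0 ps _ _
    rw [List.foldl_nil]
    have h : ∀ p ∈ ps, pvFoldActs [] p = p := fun p _ => rfl
    rw [List.map_congr_left h]
    simp
  | cons i is' ih =>
    intro hgood p0 ps hp0 hps
    have hi := hgood i List.mem_cons_self
    have hgood' : ∀ j ∈ is', j ≠ [] ∧ 'w' ∉ j := fun j hj => hgood j (List.mem_cons_of_mem _ hj)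
    rw [List.foldl_cons]
    rw [WALKZ _ (List.prefix_append _ _) p0 (pvGlue ps) hp0 (glue_shape ps)]
    rw [pass_glue hi.1 hi.2 ps hps]
    rw [ih hgood' p0 (ps.map (pvActI i)) hp0
      (fun p hp => by
        obtain ⟨q, hq, rfl⟩ := List.mem_map.mp hp
        exact actI_pres i (hps q hq))]
    rw [List.map_map]
    exact congrArg (fun l => p0 ++ pvGlue l) (List.map_congr_left (fun p _ => rfl))

-- ---- bridging port A to the character level ----
lemma pat_toList (ident : String) :
    ("window.location" ++ "." ++ ident).toList = pvP ++ ident.toList := by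
  have h : ("window.location" ++ "." : String).toList = pvP := by decide
  rw [show ("window.location" ++ "." ++ ident) = (("window.location" ++ ".") ++ ident) from rfl]
  rw [String.toList_append, h]

lemma foldA_toList :
    ∀ (is : List String) (t : String),
      (is.foldl (fun t ident =>
          PySem.Str.replace t ("window.location" ++ "." ++ ident) ("window.location" ++ ".a")) t).toList
      = (is.map String.toList).foldl (fun l i => pvRepl (pvP ++ i) (pvP ++ ['a']) l) t.toList := by
  intro is
  induction is with
  | nil => intro t; rfl
  | cons i is' ih =>
    intro t
    rw [List.map_cons, List.foldl_cons, List.foldl_cons, ih]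
    congr 1
    rw [PySem.Str.toList_replace]
    rw [pat_toList i]
    rw [show ("window.location" ++ ".a" : String).toList = pvP ++ ['a'] from by decide]
    exact replace_eq_pvRepl _ _ _ (by simp)

lemma A_toList (text : String) :
    (replace_href text).toList
      = pvAllL.foldl (fun l i => pvRepl (pvP ++ i) (pvP ++ ['a']) l) text.toList := by
  unfold replace_href
  rw [foldA_toList]
  rw [show pvAllL = iHref :: pvIdents.map String.toList from rfl, List.foldl_cons]
  congr 1
  rw [PySem.Str.toList_replace]
  rw [show ("window.location.href" : String).toList = pvP ++ iHref from by decide]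
  rw [show ("window.location.a" : String).toList = pvP ++ ['a'] from by decide]
  exact replace_eq_pvRepl _ _ _ (by simp)

-- ---- bridging port B to the character level ----
lemma foldB_toList :
    ∀ (is : List String) (s : String),
      (is.foldl (fun part ident =>
          if PySem.Str.startswith part ident then
            "a" ++ PySem.Str.slice part (some (PySem.Str.len ident)) none
          else part) s).toList
      = pvFoldActs (is.map String.toList) s.toList := by
  intro is
  induction is with
  | nil => intro s; rfl
  | cons i is' ih =>
    intro s
    rw [List.map_cons, List.foldl_cons]
    rw [show pvFoldActs (i.toList :: is'.map String.toList) s.toList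
        = pvFoldActs (is'.map String.toList) (pvActI i.toList s.toList) from rfl]
    by_cases h : i.toList <+: s.toList
    · have hb : PySem.Str.startswith s i = true := by
        rw [PySem.Str.startswith_eq]
        unfold PySem.Chars.startswith
        exact List.isPrefixOf_iff_prefix.mpr h
      rw [hb, if_pos rfl, ih]
      congr 1
      rw [show pvActI i.toList s.toList = 'a' :: s.toList.drop i.toList.length from by
        simp [pvActI, if_pos h]]
      rw [String.toList_append, PySem.Str.toList_slice]
      rw [show ("a" : String).toList = ['a'] from by decide]
      rw [PySem.Chars.slice_eq_listSlice]
      rw [PySem.Str.len_eq, PySem.List.slice_from _ (by positivity)]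
      simp
    · have hb : PySem.Str.startswith s i = false := by
        rw [PySem.Str.startswith_eq]
        unfold PySem.Chars.startswith
        rw [Bool.eq_false_iff]
        exact fun hx => h (List.isPrefixOf_iff_prefix.mp hx)
      rw [hb, if_neg (by simp), ih, pvActI_neg h]

lemma inter_glue : ∀ (ps : List (List Char)) (p0 : List Char),
    pvP.intercalate (p0 :: ps) = p0 ++ pvGlue ps := by
  intro ps
  induction ps with
  | nil => intro p0; simp [List.intercalate, pvGlue]
  | cons q ps' ih =>
    intro p0
    unfold List.intercalate
    rw [List.intersperse]
    · simp only [List.flatten_cons]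
      have h2 := ih q
      unfold List.intercalate at h2
      rw [h2]
      simp [pvGlue]
    · simp

lemma B_toList (text : String) (p0L : List Char) (psL : List (List Char))
    (hs : pvSplit text.toList = p0L :: psL) :
    (replace_href_alt text).toList
      = p0L ++ pvGlue (psL.map (pvFoldActs pvIdentsL)) := by
  have hbridge := PySem.Str.split?_map text "window.location."
  rw [show ("window.location." : String).toList = pvP from by decide] at hbridge
  rw [show PySem.Chars.split? text.toList pvP = some (PySem.Chars.splitOn text.toList pvP) from by
    unfold PySem.Chars.split?; rw [if_neg (by decide)]] at hbridge
  rw [splitOn_eq_pvSplit, hs] at hbridge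
  unfold replace_href_alt
  cases hLS : PySem.Str.split? text "window.location." with
  | none => rw [hLS] at hbridge; simp at hbridge
  | some LS =>
    rw [hLS] at hbridge
    simp only [Option.map_some, Option.some.injEq] at hbridge
    cases LS with
    | nil => simp at hbridge
    | cons S0 Srest =>
      simp only [List.map_cons, List.cons.injEq] at hbridge
      obtain ⟨h0, hrest⟩ := hbridge
      rw [PySem.Str.toList_join]
      rw [show PySem.Chars.join ("window.location." : String).toList
            ((S0 :: Srest.map (fun part => pvIdentsAlt.foldl (fun part ident =>
                if PySem.Str.startswith part ident then
                  "a" ++ PySem.Str.slice part (some (PySem.Str.len ident)) none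
                else part) part)).map String.toList)
          = pvP.intercalate ((S0 :: Srest.map (fun part => pvIdentsAlt.foldl (fun part ident =>
                if PySem.Str.startswith part ident then
                  "a" ++ PySem.Str.slice part (some (PySem.Str.len ident)) none
                else part) part)).map String.toList) from by
        unfold PySem.Chars.join
        rw [show ("window.location." : String).toList = pvP from by decide]]
      rw [List.map_cons, h0]
      rw [List.map_map]
      rw [show Srest.map (String.toList ∘ fun part => pvIdentsAlt.foldl (fun part ident =>
              if PySem.Str.startswith part ident then
                "a" ++ PySem.Str.slice part (some (PySem.Str.len ident)) none
              else part) part)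
          = psL.map (pvFoldActs pvIdentsL) from by
        rw [← hrest, List.map_map]
        apply List.map_congr_left
        intro s _
        simp only [Function.comp_apply]
        rw [foldB_toList]
        rfl]
      exact inter_glue _ _

-- ---- A's extra leading href pass is absorbed by the loop's own href pass ----
lemma foldActs_all_eq (p : List Char) : pvFoldActs pvAllL p = pvFoldActs pvIdentsL p := by
  have h : pvIdentsL = iHref :: pvIdentsL.tail := by decide
  rw [show pvAllL = iHref :: pvIdentsL from rfl, h]
  simp only [pvFoldActs, List.foldl_cons]
  congr 1
  by_cases h : iHref <+: p
  · rw [show pvActI iHref p = 'a' :: p.drop iHref.length from by simp [pvActI, if_pos h]]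
    exact pvActI_neg (head_ne_prefix (by decide))
  · rw [pvActI_neg h, pvActI_neg h]

-- ---- final assembly ----
lemma toList_inj {a b : String} (h : a.toList = b.toList) : a = b := by
  rw [← String.ofList_toList (s := a), h, String.ofList_toList]

-- ===== VERDICT (by name: the statement is the Claim_ definition above) =====
set_option maxHeartbeats 2000000 in
theorem replace_href_spec : Claim_equal_replace_href := by
  intro text _hdom
  show replace_href text = replace_href_alt text
  apply toList_inj
  rcases hsplit : pvSplit text.toList with _ | ⟨p0L, psL⟩
  · exact absurd hsplit (pvSplit_ne_nil _)
  · have htext : text.toList = p0L ++ pvGlue psL := split_join _ _ _ hsplit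
    have hp0 : ¬ pvP <:+: p0L :=
      split_pfree text.toList p0L (by rw [hsplit]; exact List.mem_cons_self)
    have hps : ∀ p ∈ psL, ¬ pvP <:+: p := fun p hp =>
      split_pfree text.toList p (by rw [hsplit]; exact List.mem_cons_of_mem _ hp)
    rw [A_toList, htext]
    rw [fold_pass pvAllL (by decide) p0L psL hp0 hps]
    rw [B_toList text p0L psL hsplit]
    exact congrArg (fun l => p0L ++ pvGlue l)
      (List.map_congr_left (fun p _ => foldActs_all_eq p))
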